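-- pv_equiv track=rewrite | github.com/szadamek/Python-Algorithms | finite_state_machine/finite_state_machine_auaw_lang.py | automaton
-- ===== SOURCE A (Python) =====
-- def automaton(input_string):
--     current_state = 0
--     i = 0
--     # while dopóki nie przeczytamy całego ciągu
--     while i < len(input_string):
--         if current_state == 0:
--             if input_string[i] != 'a':
--                 return False
--             elif input_string[i] == 'a':
--                 current_state = 1
--                 i += 1
--             else:
--                 return False
--         elif current_state == 1:
--             if input_string[i] in ['0', '1']:
--                 i += 1
--             elif input_string[i] not in ['0', '1']:
--                 current_state = 2
--         elif current_state == 2: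
--             if input_string[i] == 'a':
--                 current_state = 3
--                 i += 1
--             elif input_string[i] != 'a':
--                 return False
--         elif current_state == 3:
--             if input_string[i] in ['0', '1']:
--                 i += 1
--             elif input_string[i] not in ['0', '1']:
--                 return False
--     return True
-- ===== SOURCE B (Python) =====
-- def automaton(input_string):
--     # The accepted language is "" | a[01]* | a[01]*a[01]* : characterize it by
--     # alphabet membership and the number of 'a's instead of simulating a machine.
--     return (input_string == ""
--             or (input_string[0] == 'a'
--                 and all(c in ('a', '0', '1') for c in input_string)
--                 and input_string.count('a') <= 2))
-- ===== Notes on version B (the rewrite author's own statement) =====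
-- stated objective: alternative
-- what changed: Replaced the state-machine simulation by a closed characterization of the accepted language: accept iff the string is empty, or starts with 'a', is over the alphabet {'a','0','1'}, and contains at most two 'a's (an alphabet check plus a character count instead of any automaton).
import Mathlib
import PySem

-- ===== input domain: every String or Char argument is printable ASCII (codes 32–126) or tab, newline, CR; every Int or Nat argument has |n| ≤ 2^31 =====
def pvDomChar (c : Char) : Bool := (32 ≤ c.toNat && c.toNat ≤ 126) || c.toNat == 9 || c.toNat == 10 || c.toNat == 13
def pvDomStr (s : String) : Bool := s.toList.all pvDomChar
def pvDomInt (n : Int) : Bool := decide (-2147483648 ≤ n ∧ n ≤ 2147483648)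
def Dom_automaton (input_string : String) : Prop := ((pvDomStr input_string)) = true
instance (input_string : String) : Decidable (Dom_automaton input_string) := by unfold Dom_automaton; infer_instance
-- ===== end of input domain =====

-- B replaces A's state-machine simulation by a closed characterization of the accepted
-- language (alphabet check + count of 'a' ≤ 2); same cost, a different algorithm.

-- ===== PORT A =====
-- A's while loop: index i over the string with a state variable; here the remaining
-- characters replace the index, and the state transitions are transcribed branch by branch.
def automatonLoop : List Char → Nat → Bool
  | [], _ => true
  | c :: cs, state =>
    if state = 0 then
      if c ≠ 'a' then false
      else automatonLoop cs 1
    else if state = 1 then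
      if c = '0' ∨ c = '1' then automatonLoop cs 1
      else automatonLoop (c :: cs) 2
    else if state = 2 then
      if c = 'a' then automatonLoop cs 3
      else false
    else if state = 3 then
      if c = '0' ∨ c = '1' then automatonLoop cs 3
      else false
    else true  -- unreachable: state only ever takes values 0..3
  termination_by cs state => (cs.length, 4 - state)
  decreasing_by all_goals simp_wf <;> omega

def automaton (input_string : String) : Bool :=
  automatonLoop input_string.toList 0

-- ===== PORT B =====
-- Source B: input_string == "" or (input_string[0]=='a' and all(c in ('a','0','1')) and count('a') <= 2)
def automaton_alt (input_string : String) : Bool :=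
  (PySem.Str.len input_string == 0) ||
    ((PySem.Str.pyGet? input_string 0 == some 'a') &&
     input_string.toList.all (fun c => c == 'a' || c == '0' || c == '1') &&
     decide (PySem.Str.count input_string "a" ≤ 2))

-- ===== PRECONDITION & SPEC =====
def Spec_automaton (input_string : String) (out : Bool) : Prop := out = automaton_alt input_string
instance (input_string : String) (out : Bool) : Decidable (Spec_automaton input_string out) := by unfold Spec_automaton; infer_instance

-- ===== CLAIM (what is proved, stated in full; the proofs are below) =====
def Claim_equal_automaton : Prop := ∀ (input_string : String), Dom_automaton input_string → Spec_automaton input_string (automaton input_string)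

-- ===== LEMMAS AND PROOFS =====
-- Python's str.count with a single-character pattern is the character count.
theorem count_go_singleton (a : Char) (l : List Char) (fuel : Nat) (acc : Nat)
    (h : l.length ≤ fuel) :
    PySem.Chars.count.go [a] fuel l acc = acc + l.count a := by
  induction l generalizing fuel acc with
  | nil => cases fuel <;> simp [PySem.Chars.count.go]
  | cons c cs ih =>
    cases fuel with
    | zero => simp at h
    | succ f =>
      simp only [List.length_cons, Nat.succ_le_succ_iff] at h
      by_cases hc : a = c
      · have h1 : PySem.Chars.count.go [a] (f + 1) (c :: cs) acc
            = PySem.Chars.count.go [a] f cs (acc + 1) := by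
          simp [PySem.Chars.count.go, List.isPrefixOf, hc]
        rw [h1, ih f (acc + 1) h, List.count_cons]
        simp [hc]
        omega
      · have h1 : PySem.Chars.count.go [a] (f + 1) (c :: cs) acc
            = PySem.Chars.count.go [a] f cs acc := by
          simp [PySem.Chars.count.go, List.isPrefixOf, hc]
        rw [h1, ih f acc h, List.count_cons]
        simp [Ne.symm hc]

theorem chars_count_singleton (a : Char) (l : List Char) :
    PySem.Chars.count l [a] = l.count a := by
  simpa [PySem.Chars.count] using count_go_singleton a l l.length 0 le_rfl

-- state 3 accepts exactly the bit strings
theorem automatonLoop_state3 (cs : List Char) :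
    automatonLoop cs 3 = cs.all (fun c => c == '0' || c == '1') := by
  induction cs with
  | nil => simp [automatonLoop]
  | cons c cs ih =>
    by_cases h : c = '0' ∨ c = '1'
    · rcases h with h | h <;> subst h <;> simp [automatonLoop, ih]
    · simp [automatonLoop, h]

theorem all_bit_of_inSet_no_a (cs : List Char) :
    (cs.all (fun c => c == 'a' || c == '0' || c == '1') && decide (cs.count 'a' = 0))
      = cs.all (fun c => c == '0' || c == '1') := by
  induction cs with
  | nil => simp
  | cons c cs ih =>
    by_cases hc : c = 'a'
    · subst hc
      simp
    · rw [List.count_cons]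
      simp only [List.all_cons, ← ih]
      have : (c == 'a') = false := by simpa using hc
      simp [this, Bool.and_assoc]

-- state 1 accepts exactly the strings over {'a','0','1'} with at most one 'a'
theorem automatonLoop_state1 (cs : List Char) :
    automatonLoop cs 1 =
      (cs.all (fun c => c == 'a' || c == '0' || c == '1') && decide (cs.count 'a' ≤ 1)) := by
  induction cs with
  | nil => simp [automatonLoop]
  | cons c cs ih =>
    by_cases h : c = '0' ∨ c = '1'
    · rcases h with h | h <;> subst h <;>
        simp [automatonLoop, ih]
    · by_cases ha : c = 'a'
      · have h1 : automatonLoop (c :: cs) 1 = automatonLoop cs 3 := by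
          simp [automatonLoop, h, ha]
        rw [h1, automatonLoop_state3, ← all_bit_of_inSet_no_a]
        subst ha
        simp
      · simp [automatonLoop, h, ha]

-- ===== VERDICT (by name: the statement is the Claim_ definition above) =====
theorem automaton_spec : Claim_equal_automaton := by
  intro s _
  unfold Spec_automaton automaton automaton_alt
  rw [PySem.Str.count_eq, show ("a" : String).toList = ['a'] from rfl,
    chars_count_singleton]
  cases hs : s.toList with
  | nil => simp [automatonLoop, PySem.Str.len_eq, hs]
  | cons c cs =>
    have hlen : PySem.Str.len s = (c :: cs).length := by simp [PySem.Str.len_eq, hs]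
    have hget : PySem.Str.pyGet? s 0 = some c := by
      simp [hs]
    by_cases ha : c = 'a'
    · subst ha
      simp [automatonLoop, automatonLoop_state1, hget, hlen, hs]
      by_cases hcnt : List.count 'a' cs ≤ 1 <;> simp [hcnt] <;> omega
    · simp [automatonLoop, ha, hlen, hs]
      omega
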